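-- pv_equiv track=rewrite | github.com/oOSomnus/HydraRAG | Hydra_run/utilts.py | merge_by_relation_fast
-- ===== SOURCE A (Python) =====
-- from collections import defaultdict
-- from collections import defaultdict
-- from collections import defaultdict
--
-- def merge_by_relation_fast(paths):
--     """
--     Merge full paths by identical relation patterns, uniting their entity IDs.
--     """
--     buckets = defaultdict(list)
--     for p in paths:
--         key = tuple(p[i] for i in range(1, len(p), 2))
--         buckets[key].append(p)
--
--     merged = []
--     for group in buckets.values():
--         L = len(group[0])
--         comb = []
--         for i in range(0, L, 2):
--             # only using top 20 entities for each relation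
--             ents = {p[i] for p in group}
--             ent_str = "{" + ", ".join(sorted(ents)[:20]) + "}" if len(ents) > 1 else ents.pop()
--             comb.append(ent_str)
--             if i < L - 1:
--                 comb.append(group[0][i+1])
--         merged.append(comb)
--     return merged
-- ===== SOURCE B (Python) =====
-- def merge_by_relation_fast(paths):
--     """
--     Merge full paths by identical relation patterns, uniting their entity IDs.
--     Single accumulating pass: per relation key keep the first path (for lengths
--     and relation labels) plus one entity set per even position; then format.
--     """
--     recs = {}
--     for p in paths:
--         key = tuple(p[i] for i in range(1, len(p), 2))
--         rec = recs.get(key)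
--         if rec is None:
--             recs[key] = (p, [{p[i]} for i in range(0, len(p), 2)])
--         else:
--             first, sets = rec
--             recs[key] = (first, [s | {p[i]} for s, i in zip(sets, range(0, len(first), 2))])
--     merged = []
--     for first, sets in recs.values():
--         L = len(first)
--         comb = []
--         for i, ents in zip(range(0, L, 2), sets):
--             if len(ents) > 1:
--                 ent_str = "{" + ", ".join(sorted(ents)[:20]) + "}"
--             else:
--                 ent_str = next(iter(ents))
--             comb.append(ent_str)
--             if i < L - 1:
--                 comb.append(first[i + 1])
--         merged.append(comb)
--     return merged
-- ===== Notes on version B (the rewrite author's own statement) =====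
-- stated objective: alternative
-- what changed: A buckets all paths per relation key and then, in a second phase, re-scans each bucket to rebuild the entity set at every even position; B makes one accumulating pass that keeps per key only the first path plus one entity set per even position, so the path lists are never stored or re-traversed.
import Mathlib
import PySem

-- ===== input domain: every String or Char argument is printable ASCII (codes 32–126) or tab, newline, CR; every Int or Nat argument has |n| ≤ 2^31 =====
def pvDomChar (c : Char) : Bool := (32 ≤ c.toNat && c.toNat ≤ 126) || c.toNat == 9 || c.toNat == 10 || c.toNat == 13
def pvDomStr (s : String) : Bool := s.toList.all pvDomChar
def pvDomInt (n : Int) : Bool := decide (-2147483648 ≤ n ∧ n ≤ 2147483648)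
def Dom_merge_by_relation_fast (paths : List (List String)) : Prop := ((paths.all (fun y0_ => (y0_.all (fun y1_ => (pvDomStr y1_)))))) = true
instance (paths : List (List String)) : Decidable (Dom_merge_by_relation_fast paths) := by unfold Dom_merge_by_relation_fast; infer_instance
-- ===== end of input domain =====

-- B replaces A's bucket-the-paths-then-recompute-sets two-pass merge by one accumulating
-- pass that keeps, per relation key, the first path plus one entity set per even position
-- (objective: alternative decomposition, same asymptotic cost).

-- ===== PORT A =====
-- key = tuple(p[i] for i in range(1, len(p), 2)); indices are in range, pyGetD default never used
def pvKeyA (p : List String) : List String :=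
  (PySem.List.pyRange 1 (p.length : Int) 2).map (fun i => PySem.List.pyGetD p i "")

-- ent_str = "{" + ", ".join(sorted(ents)[:20]) + "}" if len(ents) > 1 else ents.pop()
-- (ents.pop() is only reached on a singleton set, where it is its unique element = head)
def pvEntStrA (ents : PySem.Set String) : String :=
  if 1 < ents.length then
    "{" ++ PySem.Str.join ", " (PySem.List.slice (PySem.List.sorted ents (fun x => x) false) none (some 20)) ++ "}"
  else ents.headD ""

-- the inner 'for i in range(0, L, 2)' loop building comb for one bucket; group is never
-- empty in A (headD default unreachable); p[i] out of range (IndexError) only outside Pre_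
def pvRowA (group : List (List String)) : List String :=
  let first := group.headD []
  let L : Int := first.length
  (PySem.List.pyRange 0 L 2).foldl (fun comb i =>
    let ents : PySem.Set String := PySem.Set.ofList (group.map (fun p => PySem.List.pyGetD p i ""))
    let comb := comb ++ [pvEntStrA ents]
    if i < L - 1 then comb ++ [PySem.List.pyGetD first (i + 1) ""] else comb) []

-- buckets = defaultdict(list); buckets[key].append(p)
def pvBucketsA (paths : List (List String)) : PySem.Dict (List String) (List (List String)) :=
  paths.foldl (fun d p => let k := pvKeyA p; d.insert k (d.getD k [] ++ [p])) PySem.Dict.empty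

def merge_by_relation_fast (paths : List (List String)) : List (List String) :=
  (pvBucketsA paths).values.foldl (fun merged group => merged ++ [pvRowA group]) []

-- ===== PORT B =====
-- key = tuple(p[i] for i in range(1, len(p), 2))  (same extraction as A, by design)
def pvKeyB (p : List String) : List String :=
  (PySem.List.pyRange 1 (p.length : Int) 2).map (fun i => PySem.List.pyGetD p i "")

-- next(iter(ents)) is only reached on a singleton set, where it is its unique element = head
def pvEntStrB (ents : PySem.Set String) : String :=
  if 1 < ents.length then
    "{" ++ PySem.Str.join ", " (PySem.List.slice (PySem.List.sorted ents (fun x => x) false) none (some 20)) ++ "}"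
  else ents.headD ""

-- recs[key] = (p, [{p[i]} for i in range(0, len(p), 2)])
def pvRecInit (p : List String) : List String × List (PySem.Set String) :=
  (p, (PySem.List.pyRange 0 (p.length : Int) 2).map (fun i => PySem.Set.ofList [PySem.List.pyGetD p i ""]))

-- recs[key] = (first, [s | {p[i]} for s, i in zip(sets, range(0, len(first), 2))])
-- p[i] out of range (IndexError) only outside Pre_
def pvRecAdd (p : List String) (rec : List String × List (PySem.Set String)) :
    List String × List (PySem.Set String) :=
  (rec.1, (rec.2.zip (PySem.List.pyRange 0 (rec.1.length : Int) 2)).map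
    (fun si => PySem.Set.union si.1 (PySem.Set.ofList [PySem.List.pyGetD p si.2 ""])))

-- one iteration of B's accumulating pass
def pvStepB (d : PySem.Dict (List String) (List String × List (PySem.Set String)))
    (p : List String) : PySem.Dict (List String) (List String × List (PySem.Set String)) :=
  let k := pvKeyB p
  match d.get? k with
  | none => d.insert k (pvRecInit p)
  | some rec => d.insert k (pvRecAdd p rec)

-- the 'for i, ents in zip(range(0, L, 2), sets)' loop building comb for one record
def pvRowB (rec : List String × List (PySem.Set String)) : List String :=
  let first := rec.1
  let L : Int := first.length
  ((PySem.List.pyRange 0 L 2).zip rec.2).foldl (fun comb ie =>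
    let entStr := pvEntStrB ie.2
    let comb := comb ++ [entStr]
    if ie.1 < L - 1 then comb ++ [PySem.List.pyGetD first (ie.1 + 1) ""] else comb) []

def merge_by_relation_fast_alt (paths : List (List String)) : List (List String) :=
  (paths.foldl pvStepB PySem.Dict.empty).values.foldl (fun merged rec => merged ++ [pvRowB rec]) []

-- ===== PRECONDITION & SPEC =====
-- entries of a path at odd indices (its relation pattern), for stating Pre_ without the ports
def pvOdds : List String → List String
  | [] => []
  | [_] => []
  | _ :: b :: t => b :: pvOdds t

-- Pre_ excludes exactly the inputs where A raises IndexError: some relation pattern's FIRST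
-- path has odd length while a later path with the same pattern is shorter (B raises there too).
def Pre_merge_by_relation_fast (paths : List (List String)) : Prop :=
  ¬ ∃ j < paths.length, ∃ i < j,
      pvOdds (paths.getD i []) = pvOdds (paths.getD j []) ∧
      (∀ k < i, pvOdds (paths.getD k []) ≠ pvOdds (paths.getD i [])) ∧
      (paths.getD i []).length % 2 = 1 ∧
      (paths.getD j []).length < (paths.getD i []).length
instance (paths : List (List String)) : Decidable (Pre_merge_by_relation_fast paths) := by
  unfold Pre_merge_by_relation_fast; infer_instance

def pvWitness_merge_by_relation_fast : List (List String) :=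
  [["a", "r", "b"], ["c", "r", "d"], ["a", "s", "b"]]

def Spec_merge_by_relation_fast (paths : List (List String)) (out : List (List String)) : Prop := out = merge_by_relation_fast_alt paths
instance (paths : List (List String)) (out : List (List String)) : Decidable (Spec_merge_by_relation_fast paths out) := by unfold Spec_merge_by_relation_fast; infer_instance

-- ===== CLAIM (what is proved, stated in full; the proofs are below) =====
def Claim_equal_merge_by_relation_fast : Prop := ∀ (paths : List (List String)), Dom_merge_by_relation_fast paths → Pre_merge_by_relation_fast paths → Spec_merge_by_relation_fast paths (merge_by_relation_fast paths)

-- ===== LEMMAS AND PROOFS =====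

-- the abstraction: B's record for a bucket group = (first path, entity set per even position)
def pvG (g : List (List String)) : List String × List (PySem.Set String) :=
  (g.headD [], (PySem.List.pyRange 0 ((g.headD []).length : Int) 2).map
    (fun i => PySem.Set.ofList (g.map (fun p => PySem.List.pyGetD p i ""))))

def pvF (kv : List String × List (List String)) : List String × (List String × List (PySem.Set String)) :=
  (kv.1, pvG kv.2)

theorem pv_union_single {α : Type} [BEq α] (s : PySem.Set α) (x : α) :
    PySem.Set.union s (PySem.Set.ofList [x]) = PySem.Set.add s x := rfl

theorem pv_get?_map (l : List (List String × List (List String))) (k : List String) :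
    (PySem.Dict.mk (l.map pvF)).get? k = ((PySem.Dict.mk l).get? k).map pvG := by
  induction l with
  | nil => rfl
  | cons kv t ih =>
    obtain ⟨k', v⟩ := kv
    simp only [List.map_cons, pvF, PySem.Dict.get?_mk_cons]
    split_ifs <;> simp [ih]

theorem pv_contains_map (l : List (List String × List (List String))) (k : List String) :
    (PySem.Dict.mk (l.map pvF)).contains k = (PySem.Dict.mk l).contains k := by
  rw [PySem.Dict.contains_eq_isSome_get?, PySem.Dict.contains_eq_isSome_get?, pv_get?_map]
  cases (PySem.Dict.mk l).get? k <;> rfl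

theorem pv_insert_map (l : List (List String × List (List String))) (k : List String)
    (v : List (List String)) :
    (PySem.Dict.mk (l.map pvF)).insert k (pvG v) = PySem.Dict.mk (((PySem.Dict.mk l).insert k v).items.map pvF) := by
  apply PySem.Dict.ext
  rw [PySem.Dict.items_insert, PySem.Dict.items_insert, pv_contains_map]
  split_ifs with h
  · simp only [List.map_map]
    apply List.map_congr_left
    intro p _
    by_cases hp : p.1 = k <;> simp [pvF, hp]
  · simp [pvF]

-- pvG of a singleton group is B's fresh record
theorem pv_G_single (p : List String) : pvG [p] = pvRecInit p := rfl

-- pvG of an extended group is B's record update (the group is nonempty)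
theorem pv_zip_map_self {α β : Type} (l : List α) (f : α → β) :
    (l.map f).zip l = l.map (fun a => (f a, a)) := by
  induction l with
  | nil => rfl
  | cons a t ih => simp [ih]

theorem pv_self_zip_map {α β : Type} (l : List α) (f : α → β) :
    l.zip (l.map f) = l.map (fun a => (a, f a)) := by
  induction l with
  | nil => rfl
  | cons a t ih => simp [ih]

theorem pv_G_append (g : List (List String)) (p : List String) (hg : g ≠ []) :
    pvG (g ++ [p]) = pvRecAdd p (pvG g) := by
  obtain ⟨q, t, rfl⟩ := List.exists_cons_of_ne_nil hg
  simp only [pvG, pvRecAdd, List.cons_append, List.headD_cons]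
  refine Prod.ext rfl ?_
  rw [pv_zip_map_self, List.map_map]
  apply List.map_congr_left
  intro i _
  simp only [Function.comp]
  rw [pv_union_single, show q :: (t ++ [p]) = (q :: t) ++ [p] from rfl,
      List.map_append, List.map_singleton, PySem.Set.ofList_append_singleton]

-- invariant: every bucket group is nonempty
def pvInv (d : PySem.Dict (List String) (List (List String))) : Prop :=
  ∀ kv ∈ d.items, kv.2 ≠ []

theorem pv_inv_step (d : PySem.Dict (List String) (List (List String))) (p : List String)
    (hd : pvInv d) : pvInv (d.insert (pvKeyA p) (d.getD (pvKeyA p) [] ++ [p])) := by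
  intro kv hkv
  rcases (PySem.Dict.mem_items_insert _ _ _ _).1 hkv with h | h
  · subst h; simp
  · exact hd kv h.1

-- one step of both passes stays in the pvF-image relation
theorem pv_step (d : PySem.Dict (List String) (List (List String))) (p : List String)
    (hd : pvInv d) :
    pvStepB (PySem.Dict.mk (d.items.map pvF)) p =
      PySem.Dict.mk ((d.insert (pvKeyA p) (d.getD (pvKeyA p) [] ++ [p])).items.map pvF) := by
  have hkey : pvKeyB p = pvKeyA p := rfl
  have hget := pv_get?_map d.items (pvKeyA p)
  rw [show PySem.Dict.mk d.items = d from rfl] at hget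
  simp only [pvStepB, hkey, hget]
  cases hc : d.get? (pvKeyA p) with
  | none =>
    simp only [Option.map_none]
    rw [← pv_G_single, pv_insert_map d.items]
    rw [show PySem.Dict.mk d.items = d from rfl]
    rw [PySem.Dict.getD_eq_get?_getD, hc]
    rfl
  | some g =>
    simp only [Option.map_some]
    have hg : g ≠ [] := hd (pvKeyA p, g) (PySem.Dict.mem_items_of_get?_eq_some d hc)
    rw [← pv_G_append g p hg, pv_insert_map d.items]
    rw [show PySem.Dict.mk d.items = d from rfl]
    rw [PySem.Dict.getD_eq_get?_getD, hc]
    rfl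

-- the whole pass: B's dict is the pvF-image of A's dict
theorem pv_fold (paths : List (List String)) :
    ∀ d : PySem.Dict (List String) (List (List String)), pvInv d →
      paths.foldl pvStepB (PySem.Dict.mk (d.items.map pvF)) =
        PySem.Dict.mk ((paths.foldl (fun d p => let k := pvKeyA p; d.insert k (d.getD k [] ++ [p])) d).items.map pvF) := by
  induction paths with
  | nil => intro d _; rfl
  | cons p t ih =>
    intro d hd
    simp only [List.foldl_cons]
    rw [pv_step d p hd]
    exact ih _ (pv_inv_step d p hd)

-- one bucket's output row agrees between the two formatting loops
theorem pv_row (g : List (List String)) : pvRowA g = pvRowB (pvG g) := by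
  simp only [pvRowA, pvRowB, pvG]
  rw [pv_self_zip_map, List.foldl_map]
  rfl

-- ===== VERDICT (by name: the statement is the Claim_ definition above) =====
theorem merge_by_relation_fast_spec : Claim_equal_merge_by_relation_fast := by
  intro paths _ _
  unfold Spec_merge_by_relation_fast merge_by_relation_fast merge_by_relation_fast_alt pvBucketsA
  have h0 : pvInv PySem.Dict.empty := by intro kv hkv; simp [PySem.Dict.empty] at hkv
  have h := pv_fold paths PySem.Dict.empty h0
  rw [show (PySem.Dict.mk ((PySem.Dict.empty : PySem.Dict (List String) (List (List String))).items.map pvF)) = PySem.Dict.empty from rfl] at h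
  rw [h]
  simp only [PySem.List.foldl_append_singleton_eq_map, PySem.Dict.values, List.map_map]
  apply List.map_congr_left
  intro kv _
  simp [Function.comp, pvF, pv_row]
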